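-- pv_equiv track=rewrite | github.com/CoderOneTwoThree/Test-1 | domain/plans/generator.py | _max_consecutive_training_days
-- ===== SOURCE A (Python) =====
-- def _max_consecutive_training_days(training_days: list[int]) -> int:
--     training_set = set(training_days)
--     consecutive = 0
--     max_consecutive = 0
--     for day in range(14):
--         if day % 7 in training_set:
--             consecutive += 1
--             max_consecutive = max(max_consecutive, consecutive)
--         else:
--             consecutive = 0
--     return max_consecutive
-- ===== SOURCE B (Python) =====
-- def _max_consecutive_training_days(training_days: list[int]) -> int:
--     training = set(training_days)
--     pattern = "".join("T" if day % 7 in training else "." for day in range(14))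
--     return max((len(run) for run in pattern.split(".")), default=0)
-- ===== Notes on version B (the rewrite author's own statement) =====
-- stated objective: alternative
-- what changed: Replaces the incremental running-counter-and-max scan with a table-then-group decomposition: materialize the 14-day training pattern as a string, split it on rest days, and take the maximum run length (default 0).
import Mathlib
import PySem

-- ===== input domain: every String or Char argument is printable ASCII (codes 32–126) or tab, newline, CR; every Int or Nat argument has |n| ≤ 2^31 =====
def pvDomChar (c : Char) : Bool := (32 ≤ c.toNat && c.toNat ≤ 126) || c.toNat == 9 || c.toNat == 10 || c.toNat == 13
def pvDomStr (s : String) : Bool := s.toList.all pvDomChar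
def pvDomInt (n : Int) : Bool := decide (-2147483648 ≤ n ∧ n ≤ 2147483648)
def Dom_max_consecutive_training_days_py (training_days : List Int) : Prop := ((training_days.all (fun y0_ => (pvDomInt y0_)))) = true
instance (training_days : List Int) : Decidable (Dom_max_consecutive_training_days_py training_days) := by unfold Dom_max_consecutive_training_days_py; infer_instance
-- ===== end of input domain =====

-- B replaces A's running-counter-and-max scan by a table-then-group decomposition: build the
-- 14-day pattern as a string, split on rest days, take the maximum piece length (alternative, same cost).


-- ===== PORT A =====
def max_consecutive_training_days_py (training_days : List Int) : Int :=
  let training_set : PySem.Set Int := PySem.Set.ofList training_days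
  let st :=
    (PySem.List.pyRange 0 14 1).foldl
      (fun (st : Int × Int) day =>
        if PySem.Set.contains training_set (PySem.Int.mod day 7) then
          let consecutive := st.1 + 1
          (consecutive, max st.2 consecutive)
        else
          (0, st.2))
      (0, 0)
  st.2

-- ===== PORT B =====
def max_consecutive_training_days_py_alt (training_days : List Int) : Int :=
  let training : PySem.Set Int := PySem.Set.ofList training_days
  let pattern : String :=
    PySem.Str.join ""
      ((PySem.List.pyRange 0 14 1).map
        (fun day => if PySem.Set.contains training (PySem.Int.mod day 7) then "T" else "."))
  -- s.split(".") with a non-empty literal separator never raises: split? is always `some` here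
  PySem.List.maxD (((PySem.Str.split? pattern ".").getD []).map PySem.Str.len) (fun x => x) 0

-- ===== PRECONDITION & SPEC =====
def Spec_max_consecutive_training_days_py (training_days : List Int) (out : Int) : Prop := out = max_consecutive_training_days_py_alt training_days
instance (training_days : List Int) (out : Int) : Decidable (Spec_max_consecutive_training_days_py training_days out) := by unfold Spec_max_consecutive_training_days_py; infer_instance

-- ===== CLAIM (what is proved, stated in full; the proofs are below) =====
def Claim_equal_max_consecutive_training_days_py : Prop := ∀ (training_days : List Int), Dom_max_consecutive_training_days_py training_days → Spec_max_consecutive_training_days_py training_days (max_consecutive_training_days_py training_days)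

-- ===== LEMMAS AND PROOFS =====

theorem pv_key (s : List Int) :
    ((PySem.List.pyRange 0 14 1).foldl
        (fun (st : Int × Int) day =>
          if PySem.Set.contains s (PySem.Int.mod day 7) then
            (st.1 + 1, max st.2 (st.1 + 1))
          else
            (0, st.2))
        (0, 0)).2 =
    PySem.List.maxD
      (((PySem.Str.split?
          (PySem.Str.join ""
            ((PySem.List.pyRange 0 14 1).map
              (fun day => if PySem.Set.contains s (PySem.Int.mod day 7) then "T" else "."))) ".").getD []).map
        PySem.Str.len)
      (fun x => x) 0 := by
  have hfold := List.foldl_map (f := fun day => PySem.Set.contains s (PySem.Int.mod day 7))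
    (g := fun (st : Int × Int) (b : Bool) =>
      if b then (st.1 + 1, max st.2 (st.1 + 1)) else (0, st.2))
    (l := PySem.List.pyRange 0 14 1) (init := ((0 : Int), (0 : Int)))
  have hmap : ((PySem.List.pyRange 0 14 1).map
      (fun day => if PySem.Set.contains s (PySem.Int.mod day 7) then "T" else ".")) =
      ((PySem.List.pyRange 0 14 1).map
        (fun day => PySem.Set.contains s (PySem.Int.mod day 7))).map
        (fun b => if b then "T" else ".") := by
    rw [List.map_map]; rfl
  rw [← hfold, hmap]
  have pyR : PySem.List.pyRange 0 14 1 = [0,1,2,3,4,5,6,7,8,9,10,11,12,13] := by decide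
  have m0 : PySem.Int.mod 0 7 = 0 := by decide
  have m1 : PySem.Int.mod 1 7 = 1 := by decide
  have m2 : PySem.Int.mod 2 7 = 2 := by decide
  have m3 : PySem.Int.mod 3 7 = 3 := by decide
  have m4 : PySem.Int.mod 4 7 = 4 := by decide
  have m5 : PySem.Int.mod 5 7 = 5 := by decide
  have m6 : PySem.Int.mod 6 7 = 6 := by decide
  have m7 : PySem.Int.mod 7 7 = 0 := by decide
  have m8 : PySem.Int.mod 8 7 = 1 := by decide
  have m9 : PySem.Int.mod 9 7 = 2 := by decide
  have m10 : PySem.Int.mod 10 7 = 3 := by decide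
  have m11 : PySem.Int.mod 11 7 = 4 := by decide
  have m12 : PySem.Int.mod 12 7 = 5 := by decide
  have m13 : PySem.Int.mod 13 7 = 6 := by decide
  simp only [pyR, List.map_cons, List.map_nil, m0,m1,m2,m3,m4,m5,m6,m7,m8,m9,m10,m11,m12,m13]
  generalize PySem.Set.contains s (0 : Int) = b0
  generalize PySem.Set.contains s (1 : Int) = b1
  generalize PySem.Set.contains s (2 : Int) = b2
  generalize PySem.Set.contains s (3 : Int) = b3
  generalize PySem.Set.contains s (4 : Int) = b4
  generalize PySem.Set.contains s (5 : Int) = b5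
  generalize PySem.Set.contains s (6 : Int) = b6
  revert b0 b1 b2 b3 b4 b5 b6
  decide

-- ===== VERDICT (by name: the statement is the Claim_ definition above) =====
theorem max_consecutive_training_days_py_spec : Claim_equal_max_consecutive_training_days_py := by
  intro xs _
  unfold Spec_max_consecutive_training_days_py max_consecutive_training_days_py max_consecutive_training_days_py_alt
  exact pv_key (PySem.Set.ofList xs)
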